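-- pv_equiv track=rewrite | github.com/PapieMedgar/Testing3 | sales-sync-backend/team_lead_visits_report.py | compute_team_lead_sums
-- ===== SOURCE A (Python) =====
-- from typing import Dict, List
--
-- def compute_team_lead_sums(
--     per_user_rows: List[Dict[str, int]], mapping: Dict[str, List[str]]
-- ) -> List[Dict[str, int]]:
--     """Aggregate per-user counts to per-team-lead sums per date.
--
--     Missing users are treated as 0.
--     """
--     aggregated: List[Dict[str, int]] = []
--     for row in per_user_rows:
--         out_row: Dict[str, int] = {"Date": row["Date"]}
--         for lead, users in mapping.items():
--             total = 0
--             for user in users: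
--                 total += int(row.get(user, 0) or 0)
--             out_row[lead] = total
--         aggregated.append(out_row)
--     return aggregated
-- ===== SOURCE B (Python) =====
-- from typing import Dict, List
--
-- def compute_team_lead_sums(
--     per_user_rows: List[Dict[str, int]], mapping: Dict[str, List[str]]
-- ) -> List[Dict[str, int]]:
--     """Aggregate per-user counts to per-team-lead sums per date.
--
--     Inverted-index version: map each user to the leads (with multiplicity)
--     that list it, then scatter each row's user values into the lead totals.
--     """
--     index: Dict[str, List[str]] = {}
--     for lead, users in mapping.items():
--         for user in users:
--             index.setdefault(user, []).append(lead)
--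
--     def row_totals(row: Dict[str, int]) -> Dict[str, int]:
--         totals: Dict[str, int] = {"Date": row["Date"]}
--         for lead in mapping:
--             totals[lead] = 0
--         for user, leads in index.items():
--             v = int(row.get(user, 0) or 0)
--             for lead in leads:
--                 totals[lead] += v
--         return totals
--
--     return [row_totals(row) for row in per_user_rows]
-- ===== Notes on version B (the rewrite author's own statement) =====
-- stated objective: alternative
-- what changed: B builds an inverted index user -> leads (with multiplicity) once from mapping, then for each row zero-seeds every lead and scatters each user's value into its leads, instead of A's per-row pull that re-scans every lead's user list.
import Mathlib
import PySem

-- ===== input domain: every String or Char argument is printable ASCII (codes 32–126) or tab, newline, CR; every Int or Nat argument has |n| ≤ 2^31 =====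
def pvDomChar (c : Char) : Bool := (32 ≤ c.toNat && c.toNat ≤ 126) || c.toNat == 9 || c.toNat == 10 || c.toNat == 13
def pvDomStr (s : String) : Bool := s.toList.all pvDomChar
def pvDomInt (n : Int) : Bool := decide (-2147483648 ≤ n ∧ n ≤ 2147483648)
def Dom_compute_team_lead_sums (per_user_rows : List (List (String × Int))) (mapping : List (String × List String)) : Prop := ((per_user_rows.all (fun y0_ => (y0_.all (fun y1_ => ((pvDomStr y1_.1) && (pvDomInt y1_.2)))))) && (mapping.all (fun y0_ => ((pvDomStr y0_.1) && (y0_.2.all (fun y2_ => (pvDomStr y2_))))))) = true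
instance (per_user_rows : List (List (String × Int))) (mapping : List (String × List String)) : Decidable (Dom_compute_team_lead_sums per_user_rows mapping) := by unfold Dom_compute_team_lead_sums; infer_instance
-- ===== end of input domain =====

-- B replaces A's per-row lead-by-lead pull (for every lead, re-scan its user list) by a
-- once-built inverted index user → leads and a per-row scatter of each user's value;
-- same asymptotic cost, a genuinely different traversal (objective: alternative).

-- ===== PORT A =====
-- Literal port of A. `int(row.get(user, 0) or 0)` on an int value v is v itself
-- (`v or 0` is v for v ≠ 0 and 0 for v = 0; `int` is the identity on ints), so it is
-- ported as `row.getD user 0`. `row["Date"]` raises KeyError when absent; Pre_ excludes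
-- that, so it is ported as `row.getD "Date" 0`.
def compute_team_lead_sums (per_user_rows : List (List (String × Int))) (mapping : List (String × List String)) : List (List (String × Int)) :=
  let m := PySem.Dict.ofList mapping
  per_user_rows.foldl (fun aggregated rowL =>
    let row := PySem.Dict.ofList rowL
    let out0 : PySem.Dict String Int := (PySem.Dict.empty).insert "Date" (row.getD "Date" 0)
    let outRow := m.items.foldl (fun out lu =>
        out.insert lu.1 (lu.2.foldl (fun total user => total + row.getD user 0) 0)) out0
    aggregated ++ [outRow.items]) []

-- ===== PORT B =====
-- Literal port of Source B: `index.setdefault(user, []).append(lead)` is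
-- `d.modify user [] (· ++ [lead])`; the per-row loops follow Source B's order.
def compute_team_lead_sums_alt (per_user_rows : List (List (String × Int))) (mapping : List (String × List String)) : List (List (String × Int)) :=
  let m := PySem.Dict.ofList mapping
  let index : PySem.Dict String (List String) :=
    m.items.foldl (fun d lu => lu.2.foldl (fun d user => d.modify user [] (· ++ [lu.1])) d) PySem.Dict.empty
  per_user_rows.map (fun rowL =>
    let row := PySem.Dict.ofList rowL
    let out0 : PySem.Dict String Int :=
      m.keys.foldl (fun o lead => o.insert lead 0) ((PySem.Dict.empty).insert "Date" (row.getD "Date" 0))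
    let outRow := index.items.foldl (fun o ul =>
        let v := row.getD ul.1 0
        ul.2.foldl (fun o lead => o.modify lead 0 (· + v)) o) out0
    outRow.items)

-- ===== PRECONDITION & SPEC =====
-- Pre_ excludes rows without a "Date" key, on which A raises KeyError at row["Date"].
def Pre_compute_team_lead_sums (per_user_rows : List (List (String × Int))) (mapping : List (String × List String)) : Prop :=
  ∀ rowL ∈ per_user_rows, "Date" ∈ rowL.map Prod.fst
instance (per_user_rows : List (List (String × Int))) (mapping : List (String × List String)) : Decidable (Pre_compute_team_lead_sums per_user_rows mapping) := by unfold Pre_compute_team_lead_sums; infer_instance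
def pvWitness_compute_team_lead_sums : (List (List (String × Int))) × (List (String × List String)) :=
  ([[("Date", 3), ("u1", 2), ("u2", 5)]], [("L1", ["u1", "u2", "u1"]), ("L2", [])])
def Spec_compute_team_lead_sums (per_user_rows : List (List (String × Int))) (mapping : List (String × List String)) (out : List (List (String × Int))) : Prop := out = compute_team_lead_sums_alt per_user_rows mapping
instance (per_user_rows : List (List (String × Int))) (mapping : List (String × List String)) (out : List (List (String × Int))) : Decidable (Spec_compute_team_lead_sums per_user_rows mapping out) := by unfold Spec_compute_team_lead_sums; infer_instance

-- ===== CLAIM (what is proved, stated in full; the proofs are below) =====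
def Claim_equal_compute_team_lead_sums : Prop := ∀ (per_user_rows : List (List (String × Int))) (mapping : List (String × List String)), Dom_compute_team_lead_sums per_user_rows mapping → Pre_compute_team_lead_sums per_user_rows mapping → Spec_compute_team_lead_sums per_user_rows mapping (compute_team_lead_sums per_user_rows mapping)

-- ===== LEMMAS AND PROOFS =====

-- getD after the inner scatter loop: each occurrence of k in ls adds v.
theorem scatter1_getD (v : Int) (ls : List String) :
    ∀ (o : PySem.Dict String Int) (k : String),
    (ls.foldl (fun o lead => o.modify lead 0 (· + v)) o).getD k 0
      = o.getD k 0 + (ls.count k : Int) * v := by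
  induction ls with
  | nil => intro o k; simp
  | cons x t ih =>
    intro o k
    rw [List.foldl_cons, ih, PySem.Dict.getD_modify]
    by_cases h : k = x
    · subst h; simp; ring
    · simp [h, Ne.symm h]

-- the inner scatter loop does not change the key list when every lead is present
theorem scatter1_keys (v : Int) (ls : List String) :
    ∀ (o : PySem.Dict String Int), (∀ l ∈ ls, l ∈ o.keys) →
    (ls.foldl (fun o lead => o.modify lead 0 (· + v)) o).keys = o.keys := by
  induction ls with
  | nil => intro o _; rfl
  | cons x t ih =>
    intro o h
    rw [List.foldl_cons, ih]
    · rw [PySem.Dict.keys_modify, PySem.Dict.keys_insert_of_contains]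
      exact (PySem.Dict.contains_iff_mem_keys o x).mpr (h x (by simp))
    · intro l hl
      rw [PySem.Dict.keys_modify, PySem.Dict.keys_insert_of_contains]
      · exact h l (by simp [hl])
      · exact (PySem.Dict.contains_iff_mem_keys o x).mpr (h x (by simp))

-- getD after the outer scatter loop
theorem scatter2_getD (val : String → Int) (L : List (String × List String)) :
    ∀ (o : PySem.Dict String Int) (k : String),
    (L.foldl (fun o ul => ul.2.foldl (fun o lead => o.modify lead 0 (· + val ul.1)) o) o).getD k 0
      = o.getD k 0 + (L.map (fun ul => (ul.2.count k : Int) * val ul.1)).sum := by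
  induction L with
  | nil => intro o k; simp
  | cons ul t ih =>
    intro o k
    rw [List.foldl_cons, ih, scatter1_getD]
    simp; ring

-- the outer scatter loop does not change the key list
theorem scatter2_keys (val : String → Int) (L : List (String × List String)) :
    ∀ (o : PySem.Dict String Int), (∀ ul ∈ L, ∀ l ∈ ul.2, l ∈ o.keys) →
    (L.foldl (fun o ul => ul.2.foldl (fun o lead => o.modify lead 0 (· + val ul.1)) o) o).keys = o.keys := by
  induction L with
  | nil => intro o _; rfl
  | cons ul t ih =>
    intro o h
    rw [List.foldl_cons, ih, scatter1_keys]
    · exact fun l hl => h ul (by simp) l hl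
    · intro ul' h1 l hl
      rw [scatter1_keys]
      · exact h ul' (by simp [h1]) l hl
      · exact fun l' hl' => h ul (by simp) l' hl'

-- getD after A's insert loop over a Nodup-keyed association list
theorem ins_getD (f : String × List String → Int) (l : List (String × List String)) :
    ∀ (d : PySem.Dict String Int) (k : String), (l.map Prod.fst).Nodup →
    (l.foldl (fun o p => o.insert p.1 (f p)) d).getD k 0
      = match l.find? (fun p => p.1 == k) with
        | some p => f p
        | none => d.getD k 0 := by
  induction l with
  | nil => intro d k _; rfl
  | cons p t ih =>
    intro d k hnd
    rw [List.foldl_cons, ih _ _ (by simp only [List.map_cons, List.nodup_cons] at hnd; exact hnd.2)]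
    by_cases h : p.1 = k
    · have ht : t.find? (fun q => q.1 == k) = none := by
        rw [List.find?_eq_none]
        intro q hq
        simp only [beq_iff_eq]
        intro hqk
        have : p.1 ∈ t.map Prod.fst := by
          rw [h, ← hqk]; exact List.mem_map_of_mem hq
        simp only [List.map_cons, List.nodup_cons] at hnd
        exact hnd.1 this
      simp [ht, h]
    · cases hf : t.find? (fun q => q.1 == k) with
      | none => simp [h, hf, PySem.Dict.getD_insert, Ne.symm h]
      | some q => simp [h, hf]

-- getD after B's zero-initialisation loop
theorem zeros_getD (ks : List String) :
    ∀ (d : PySem.Dict String Int) (k : String),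
    (ks.foldl (fun o x => o.insert x 0) d).getD k 0 = if k ∈ ks then 0 else d.getD k 0 := by
  induction ks with
  | nil => intro d k; simp
  | cons x t ih =>
    intro d k
    rw [List.foldl_cons, ih, PySem.Dict.getD_insert]
    by_cases hx : k = x <;> by_cases ht : k ∈ t <;> simp [hx, ht]

-- two dicts with equal Nodup key lists and equal getD are equal as item lists
theorem items_eq_of_keys_getD {d d' : PySem.Dict String Int}
    (hk : d.keys = d'.keys) (hn : d.keys.Nodup)
    (hv : ∀ k, d.getD k 0 = d'.getD k 0) : d.items = d'.items := by
  have hlen : d.items.length = d'.items.length := by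
    have := congrArg List.length hk
    simpa [PySem.Dict.keys] using this
  apply List.ext_getElem hlen
  intro i h1 h2
  have hfst : (d.items[i]).1 = (d'.items[i]).1 := by
    have := congrArg (fun l => l[i]?) hk
    simp only [PySem.Dict.keys, List.getElem?_map] at this
    rw [List.getElem?_eq_getElem h1, List.getElem?_eq_getElem h2] at this
    simpa using this
  have hm1 : ((d.items[i]).1, (d.items[i]).2) ∈ d.items := by
    simp only [Prod.mk.eta]
    exact List.getElem_mem h1
  have hm2 : ((d'.items[i]).1, (d'.items[i]).2) ∈ d'.items := by
    simp only [Prod.mk.eta]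
    exact List.getElem_mem h2
  have e1 := PySem.Dict.getD_of_mem_items d hm1 hn 0
  have e2 := PySem.Dict.getD_of_mem_items d' hm2 (hk ▸ hn) 0
  have : (d.items[i]).2 = (d'.items[i]).2 := by
    rw [← e1, ← e2, ← hfst, hv]
  exact Prod.ext hfst this

-- summing an indicator over a Nodup list picks out one value
theorem ind_sum (val : String → Int) (x : String) :
    ∀ (ds : List String), ds.Nodup → x ∈ ds →
    (ds.map (fun u => (if u = x then (1 : Int) else 0) * val u)).sum = val x := by
  intro ds
  induction ds with
  | nil => intro _ h; simp at h
  | cons y t ih =>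
    intro hnd hx
    simp only [List.map_cons, List.sum_cons]
    by_cases h : y = x
    · subst h
      have : (t.map (fun u => (if u = y then (1 : Int) else 0) * val u)).sum = 0 := by
        apply List.sum_eq_zero
        intro z hz
        obtain ⟨u, hu, rfl⟩ := List.mem_map.mp hz
        have : u ≠ y := fun e => (List.nodup_cons.mp hnd).1 (e ▸ hu)
        simp [this]
      rw [if_pos rfl, one_mul, this, add_zero]
    · have hx' : x ∈ t := by
        rcases List.mem_cons.mp hx with h' | h'
        · exact absurd h'.symm h
        · exact h'
      rw [ih (List.nodup_cons.mp hnd).2 hx', if_neg h, zero_mul, zero_add]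

-- sum of count * value over the distinct key list equals the plain sum over the list
theorem count_sum (val : String → Int) (ds : List String) (hnd : ds.Nodup) :
    ∀ (l : List String), (∀ x ∈ l, x ∈ ds) →
    (ds.map (fun u => (l.count u : Int) * val u)).sum = (l.map val).sum := by
  intro l
  induction l with
  | nil =>
    intro _
    simp only [List.map_nil, List.sum_nil]
    apply List.sum_eq_zero
    intro z hz
    obtain ⟨u, _, rfl⟩ := List.mem_map.mp hz
    simp
  | cons x t ih =>
    intro h
    have step : ds.map (fun u => (((x :: t).count u : Int)) * val u)
        = ds.map (fun u => (t.count u : Int) * val u + (if u = x then (1 : Int) else 0) * val u) := by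
      apply List.map_congr_left
      intro u _
      by_cases hux : u = x
      · subst hux; simp; ring
      · simp [hux, Ne.symm hux]
    rw [step, PySem.List.sum_map_add_int, ih (fun y hy => h y (by simp [hy])),
        ind_sum val x ds hnd (h x (by simp))]
    simp [add_comm]

-- flattening B's nested index-building loop
theorem nested_foldl {alpha : Type} (step : alpha → (String × String) → alpha) (L : List (String × List String)) :
    ∀ (d : alpha),
    L.foldl (fun d lu => lu.2.foldl (fun d u => step d (u, lu.1)) d) d
      = (L.flatMap (fun lu => lu.2.map (fun u => (u, lu.1)))).foldl step d := by
  induction L with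
  | nil => intro d; rfl
  | cons lu t ih =>
    intro d
    rw [List.foldl_cons, ih, List.flatMap_cons, List.foldl_append, List.foldl_map]

-- counting in the filtered-projected list is counting the pair
theorem cnt_filter (u k : String) : ∀ (P : List (String × String)),
    ((P.filter (fun p => p.1 == u)).map (fun p => p.2)).count k = P.count (u, k) := by
  intro P
  induction P with
  | nil => rfl
  | cons p t ih =>
    rw [List.count_cons]
    by_cases h : p.1 = u
    · rw [List.filter_cons_of_pos (by simpa using h), List.map_cons, List.count_cons, ih]
      by_cases h2 : p.2 = k
      · have : p = (u, k) := Prod.ext h h2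
        simp [this]
      · have : p ≠ (u, k) := fun e => h2 (by rw [e])
        simp [h2, this]
    · rw [List.filter_cons_of_neg (by simpa using h), ih]
      have : p ≠ (u, k) := fun e => h (by rw [e])
      simp [this]

-- counting a pair in one user-list's contribution to the index pairs
theorem count_pair (u k : String) : ∀ (ld : String) (us : List String),
    (us.map (fun u' => (u', ld))).count (u, k) = if ld = k then us.count u else 0 := by
  intro ld us
  induction us with
  | nil => simp
  | cons x t ih =>
    rw [List.map_cons, List.count_cons, ih, List.count_cons]
    by_cases hl : ld = k <;> by_cases hx : x = u <;> simp [hl, hx, Prod.ext_iff]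

-- summing over an association list with Nodup keys picks out the single matching entry
theorem single_sum (g : (String × List String) → Int) (k : String) :
    ∀ (l : List (String × List String)), (l.map Prod.fst).Nodup →
    ∀ lu0 ∈ l, lu0.1 = k →
    (l.map (fun lu => if lu.1 = k then g lu else 0)).sum = g lu0 := by
  intro l
  induction l with
  | nil => intro _ lu0 h; simp at h
  | cons p t ih =>
    intro hnd lu0 hmem hk
    simp only [List.map_cons, List.nodup_cons] at hnd
    simp only [List.map_cons, List.sum_cons]
    rcases List.mem_cons.mp hmem with rfl | hmt
    · rw [if_pos hk]
      have h0 : (t.map (fun lu => if lu.1 = k then g lu else 0)).sum = 0 := by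
        apply List.sum_eq_zero
        intro z hz
        obtain ⟨lu, hlu, rfl⟩ := List.mem_map.mp hz
        have : lu.1 ≠ k := by
          intro e
          exact hnd.1 (hk ▸ e ▸ List.mem_map_of_mem hlu)
        simp [this]
      rw [h0, add_zero]
    · have hp : p.1 ≠ k := by
        intro e
        exact hnd.1 (e ▸ hk ▸ List.mem_map_of_mem hmt)
      rw [if_neg hp, zero_add]
      exact ih hnd.2 lu0 hmt hk

-- the key per-row fact: B's zero-init + scatter dict equals A's insert-totals dict
theorem row_dict_eq (m : PySem.Dict String (List String)) (hm : m.keys.Nodup)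
    (val : String → Int)
    (d0 : PySem.Dict String Int) (hd0 : d0.keys.Nodup) :
    (((m.items.foldl (fun d lu => lu.2.foldl (fun d user => d.modify user [] (· ++ [lu.1])) d)
        PySem.Dict.empty).items).foldl
      (fun o ul => ul.2.foldl (fun o lead => o.modify lead 0 (· + val ul.1)) o)
      (m.keys.foldl (fun o lead => o.insert lead 0) d0)).items
    = (m.items.foldl (fun out lu =>
        out.insert lu.1 (lu.2.foldl (fun total user => total + val user) 0)) d0).items := by
  have hmk : m.keys = m.items.map Prod.fst := by simp [PySem.Dict.keys]
  have hmnd : (m.items.map Prod.fst).Nodup := hmk ▸ hm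
  -- the index in flattened form
  have hidx : (m.items.foldl (fun d lu => lu.2.foldl (fun d user => d.modify user [] (· ++ [lu.1])) d)
        PySem.Dict.empty)
      = (m.items.flatMap (fun lu => lu.2.map (fun u => (u, lu.1)))).foldl
          (fun d p => d.modify p.1 [] (· ++ [p.2])) PySem.Dict.empty :=
    nested_foldl (fun d p => d.modify p.1 [] (· ++ [p.2])) m.items PySem.Dict.empty
  rw [hidx]
  set P : List (String × String) := m.items.flatMap (fun lu => lu.2.map (fun u => (u, lu.1))) with hP
  set I : PySem.Dict String (List String) :=
    P.foldl (fun d p => d.modify p.1 [] (· ++ [p.2])) PySem.Dict.empty with hI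
  set out0 : PySem.Dict String Int := m.keys.foldl (fun o lead => o.insert lead 0) d0 with hout0
  -- facts about the inverted index I
  have hIkeys : I.keys = PySem.Set.update PySem.Dict.empty.keys (P.map Prod.fst) :=
    PySem.Dict.keys_foldl_modify_key P Prod.fst [] (fun _ p => (· ++ [p.2])) PySem.Dict.empty
  have hInd : I.keys.Nodup :=
    PySem.Dict.nodup_keys_foldl_modify_key P Prod.fst [] (fun _ p => (· ++ [p.2]))
      PySem.Dict.empty (by rw [PySem.Dict.keys_empty]; exact List.nodup_nil)
  have hIget : ∀ u, I.getD u [] = (P.filter (fun p => p.1 == u)).map (fun p => p.2) := by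
    intro u
    have := PySem.Dict.getD_foldl_modify_append P PySem.Dict.empty u
    simpa [PySem.Dict.getD_empty] using this
  have hImem : ∀ u, u ∈ I.keys ↔ u ∈ P.map Prod.fst := by
    intro u
    rw [hIkeys, PySem.Dict.keys_empty]
    simp [PySem.Set.mem_update]
  have hPmem : ∀ p : String × String, p ∈ P ↔ ∃ lu ∈ m.items, p.2 = lu.1 ∧ p.1 ∈ lu.2 := by
    intro p
    rw [hP]
    simp only [List.mem_flatMap, List.mem_map]
    constructor
    · rintro ⟨lu, hlu, u, hu, rfl⟩
      exact ⟨lu, hlu, rfl, hu⟩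
    · rintro ⟨lu, hlu, h2, h1⟩
      exact ⟨lu, hlu, p.1, h1, by rw [← h2]⟩
  -- facts about the zero-initialised row dict
  have hout0keys : out0.keys = PySem.Set.update d0.keys (m.keys.map id) :=
    PySem.Dict.keys_foldl_insert_key m.keys id (fun _ _ => 0) d0
  have hout0nd : out0.keys.Nodup :=
    PySem.Dict.nodup_keys_foldl_insert_key m.keys id (fun _ _ => 0) d0 hd0
  have hout0mem : ∀ x, x ∈ out0.keys ↔ x ∈ d0.keys ∨ x ∈ m.keys := by
    intro x
    rw [hout0keys, List.map_id]
    exact PySem.Set.mem_update d0.keys m.keys x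
  -- every lead occurring in an index entry is a key of out0
  have hlead : ∀ ul ∈ I.items, ∀ l ∈ ul.2, l ∈ out0.keys := by
    intro ul hul l hl
    have hentry : I.getD ul.1 [] = ul.2 :=
      PySem.Dict.getD_of_mem_items I (show (ul.1, ul.2) ∈ I.items by simpa using hul) hInd []
    rw [← hentry, hIget] at hl
    obtain ⟨p, hpf, rfl⟩ := List.mem_map.mp hl
    obtain ⟨lu, hlu, h2, _⟩ := (hPmem p).mp (List.mem_of_mem_filter hpf)
    refine (hout0mem _).mpr (Or.inr ?_)
    rw [h2, hmk]
    exact List.mem_map_of_mem hlu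
  apply items_eq_of_keys_getD
  · -- keys agree
    rw [scatter2_keys val I.items out0 hlead, hout0keys, List.map_id,
        PySem.Dict.keys_foldl_insert_key m.items Prod.fst _ d0, hmk]
  · -- Nodup
    rw [scatter2_keys val I.items out0 hlead]
    exact hout0nd
  · -- values agree
    intro k
    rw [scatter2_getD val I.items out0 k, zeros_getD m.keys d0 k,
        ins_getD (fun lu => lu.2.foldl (fun total user => total + val user) 0) m.items d0 k hmnd]
    -- rewrite each summand: entry count in I equals pair count in P
    have hmapP : I.items.map (fun ul => ((ul.2.count k : Int)) * val ul.1)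
        = I.keys.map (fun u => ((P.count (u, k) : Int)) * val u) := by
      have h1 : I.items.map (fun ul => ((ul.2.count k : Int)) * val ul.1)
          = I.items.map (fun ul => ((P.count (ul.1, k) : Int)) * val ul.1) := by
        apply List.map_congr_left
        intro ul hul
        have hentry : I.getD ul.1 [] = ul.2 :=
          PySem.Dict.getD_of_mem_items I (show (ul.1, ul.2) ∈ I.items by simpa using hul) hInd []
        rw [← hentry, hIget, cnt_filter]
      rw [h1]
      simp only [PySem.Dict.keys, List.map_map]
      rfl
    rw [hmapP]
    -- the integer pair count as an indicator sum over m.items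
    have hcnt : ∀ u, ((P.count (u, k) : Int))
        = (m.items.map (fun lu => if lu.1 = k then ((lu.2.count u : Int)) else 0)).sum := by
      intro u
      rw [hP, List.count_flatMap]
      rw [Nat.cast_list_sum, List.map_map]
      apply congrArg List.sum
      apply List.map_congr_left
      intro lu _
      simp only [Function.comp_apply, count_pair]
      by_cases h : lu.1 = k <;> simp [h]
    by_cases hk : k ∈ m.keys
    · -- k is a lead: find the unique entry
      rw [hmk] at hk
      obtain ⟨lu0, hlu0, hk0⟩ := List.mem_map.mp hk
      cases hfind : m.items.find? (fun p => p.1 == k) with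
      | none =>
        exfalso
        exact (List.find?_eq_none.mp hfind) lu0 hlu0 (by simpa using hk0)
      | some lu1 =>
        have hlu1mem := List.mem_of_find?_eq_some hfind
        have hlu11 : lu1.1 = k := by simpa using List.find?_some hfind
        have hsum : (I.keys.map (fun u => ((P.count (u, k) : Int)) * val u)).sum
            = (lu1.2.map val).sum := by
          have h2 : I.keys.map (fun u => ((P.count (u, k) : Int)) * val u)
              = I.keys.map (fun u => ((lu1.2.count u : Int)) * val u) := by
            apply List.map_congr_left
            intro u _
            rw [hcnt u,
              single_sum (fun lu => ((lu.2.count u : Int))) k m.items hmnd lu1 hlu1mem hlu11]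
          rw [h2]
          apply count_sum val I.keys hInd lu1.2
          intro x hx
          rw [hImem]
          refine List.mem_map_of_mem ((hPmem (x, lu1.1)).mpr ⟨lu1, hlu1mem, rfl, hx⟩)
        rw [if_pos (hmk ▸ hk), hsum]
        show 0 + (List.map val lu1.2).sum = lu1.2.foldl (fun total user => total + val user) 0
        rw [PySem.List.foldl_add]
    · -- k is not a lead
      cases hfind : m.items.find? (fun p => p.1 == k) with
      | some lu1 =>
        exfalso
        have hlu1mem := List.mem_of_find?_eq_some hfind
        have hlu11 : lu1.1 = k := by simpa using List.find?_some hfind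
        refine hk ?_
        rw [hmk, ← hlu11]
        exact List.mem_map_of_mem hlu1mem
      | none =>
        have hz : (I.keys.map (fun u => ((P.count (u, k) : Int)) * val u)).sum = 0 := by
          apply List.sum_eq_zero
          intro z hz
          obtain ⟨u, _, rfl⟩ := List.mem_map.mp hz
          have : P.count (u, k) = 0 := by
            rw [List.count_eq_zero]
            intro hmem
            obtain ⟨lu, hlu, h2, _⟩ := (hPmem (u, k)).mp hmem
            refine hk ?_
            rw [hmk, show k = lu.1 by simpa using h2]
            exact List.mem_map_of_mem hlu
          rw [this]
          simp
        rw [hz, if_neg (fun h => hk h), add_zero]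


-- ===== VERDICT (by name: the statement is the Claim_ definition above) =====
theorem compute_team_lead_sums_spec : Claim_equal_compute_team_lead_sums := by
  intro per_user_rows mapping _ _
  unfold Spec_compute_team_lead_sums compute_team_lead_sums compute_team_lead_sums_alt
  rw [PySem.List.foldl_append_singleton_eq_map]
  simp only [List.nil_append]
  apply List.map_congr_left
  intro rowL _
  exact (row_dict_eq (PySem.Dict.ofList mapping) (PySem.Dict.nodup_keys_ofList mapping)
    (fun u => (PySem.Dict.ofList rowL).getD u 0)
    ((PySem.Dict.empty).insert "Date" ((PySem.Dict.ofList rowL).getD "Date" 0))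
    (PySem.Dict.nodup_keys_insert _ _ _ PySem.Dict.nodup_keys_empty)).symm
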